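-- pv_equiv track=rewrite | github.com/Kushalsaggidi/LAWGPT | Train/flatten.py | _build_assistant_response
-- ===== SOURCE A (Python) =====
-- from typing import Dict, List, Any, Optional
--
-- def _build_assistant_response(case_summary: Dict, court_reasoning: Dict,
--                              metadata: Dict) -> str:
--     """Build the assistant response string."""
--     sections = []
--
--     if any(case_summary.get(k) for k in ['facts', 'legal_issue', 'law_applied', 'judgment']):
--         sections.append(
--             "**Case Summary**\n"
--             f"- Facts: {case_summary.get('facts', 'Not provided')}\n"
--             f"- Legal Issue: {case_summary.get('legal_issue', 'Not provided')}\n"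
--             f"- Law Applied: {case_summary.get('law_applied', 'Not provided')}\n"
--             f"- Judgment: {case_summary.get('judgment', 'Not provided')}"
--         )
--
--     if any(court_reasoning.get(k) for k in ['reasoning', 'decision']):
--         sections.append(
--             "**Court Reasoning**\n"
--             f"- Reasoning: {court_reasoning.get('reasoning', 'Not provided')}\n"
--             f"- Decision: {court_reasoning.get('decision', 'Not provided')}"
--         )
--
--     if any(metadata.get(k) for k in ['category', 'case_type', 'law']):
--         sections.append(
--             "**Metadata**\n"
--             f"- Category: {metadata.get('category', 'Not specified')}\n"
--             f"- Case Type: {metadata.get('case_type', 'Not specified')}\n"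
--             f"- Law: {metadata.get('law', 'Not specified')}"
--         )
--
--     return "\n\n".join(sections)
-- ===== SOURCE B (Python) =====
-- def _build_assistant_response(case_summary, court_reasoning, metadata):
--     """Build the assistant response string.
--
--     Each section is rendered by ONE fused pass over its field table that
--     simultaneously formats every line and records whether any value is truthy;
--     the section helper returns the rendered block or None, and the result is
--     the join of the non-None blocks.
--     """
--     def section(header, src, default, fields):
--         found = False
--         lines = [header]
--         for label, key in fields:
--             if key in src:
--                 value = src[key]
--                 found = found or bool(value)
--             else:
--                 value = default
--             lines.append(f"- {label}: {value}")
--         return "\n".join(lines) if found else None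
--
--     candidates = [
--         section("**Case Summary**", case_summary, "Not provided",
--                 [("Facts", "facts"), ("Legal Issue", "legal_issue"),
--                  ("Law Applied", "law_applied"), ("Judgment", "judgment")]),
--         section("**Court Reasoning**", court_reasoning, "Not provided",
--                 [("Reasoning", "reasoning"), ("Decision", "decision")]),
--         section("**Metadata**", metadata, "Not specified",
--                 [("Category", "category"), ("Case Type", "case_type"),
--                  ("Law", "law")]),
--     ]
--     return "\n\n".join(s for s in candidates if s is not None)
-- ===== Notes on version B (the rewrite author's own statement) =====
-- stated objective: alternative
-- what changed: Each section is produced by one fused pass over a field table that formats every line and detects truthiness at the same time, returning the block or None; the result joins the non-None blocks — instead of A's separate any()-guard pass followed by an unrolled f-string per section.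
import Mathlib
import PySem

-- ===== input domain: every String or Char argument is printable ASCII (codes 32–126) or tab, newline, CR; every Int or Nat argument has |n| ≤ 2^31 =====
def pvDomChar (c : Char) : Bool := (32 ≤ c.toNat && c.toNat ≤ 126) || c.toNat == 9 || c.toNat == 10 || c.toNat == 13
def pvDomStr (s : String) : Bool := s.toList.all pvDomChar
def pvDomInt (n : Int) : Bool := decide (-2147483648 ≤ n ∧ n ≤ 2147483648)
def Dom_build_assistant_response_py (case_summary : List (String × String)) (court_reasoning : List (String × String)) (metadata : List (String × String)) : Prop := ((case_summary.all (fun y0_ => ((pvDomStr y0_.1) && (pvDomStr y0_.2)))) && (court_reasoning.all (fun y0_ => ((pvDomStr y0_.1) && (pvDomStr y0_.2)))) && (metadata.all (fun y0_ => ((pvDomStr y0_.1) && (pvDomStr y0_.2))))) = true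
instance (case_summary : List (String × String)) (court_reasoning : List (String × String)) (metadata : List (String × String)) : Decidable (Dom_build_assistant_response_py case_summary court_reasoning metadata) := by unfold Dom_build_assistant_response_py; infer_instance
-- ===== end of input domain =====

-- B renders each section by ONE fused pass over a field table that formats the lines
-- and detects truthiness at the same time, returning Option String; A runs a separate
-- any() guard pass and then an unrolled f-string per section. Objective: alternative.

-- dict.get k dflt (first-match lookup on the association list; used by port A)
def pvGet (d : List (String × String)) (k dflt : String) : String :=
  (d.lookup k).getD dflt

-- truthiness of d.get(k): present with a non-empty value (used by port A's any())
def pvTruthy (d : List (String × String)) (k : String) : Bool :=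
  (d.lookup k).getD "" != ""

-- ===== PORT A =====
def build_assistant_response_py (case_summary : List (String × String)) (court_reasoning : List (String × String)) (metadata : List (String × String)) : String :=
  let sections : List String := []
  let sections :=
    if (["facts", "legal_issue", "law_applied", "judgment"].any fun k => pvTruthy case_summary k) then
      sections ++ ["**Case Summary**\n"
        ++ "- Facts: " ++ pvGet case_summary "facts" "Not provided" ++ "\n"
        ++ "- Legal Issue: " ++ pvGet case_summary "legal_issue" "Not provided" ++ "\n"
        ++ "- Law Applied: " ++ pvGet case_summary "law_applied" "Not provided" ++ "\n"
        ++ "- Judgment: " ++ pvGet case_summary "judgment" "Not provided"]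
    else sections
  let sections :=
    if (["reasoning", "decision"].any fun k => pvTruthy court_reasoning k) then
      sections ++ ["**Court Reasoning**\n"
        ++ "- Reasoning: " ++ pvGet court_reasoning "reasoning" "Not provided" ++ "\n"
        ++ "- Decision: " ++ pvGet court_reasoning "decision" "Not provided"]
    else sections
  let sections :=
    if (["category", "case_type", "law"].any fun k => pvTruthy metadata k) then
      sections ++ ["**Metadata**\n"
        ++ "- Category: " ++ pvGet metadata "category" "Not specified" ++ "\n"
        ++ "- Case Type: " ++ pvGet metadata "case_type" "Not specified" ++ "\n"
        ++ "- Law: " ++ pvGet metadata "law" "Not specified"]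
    else sections
  PySem.Str.join "\n\n" sections

-- ===== PORT B =====
-- fused pass: one fold over the field table accumulating (found-truthy?, lines)
def pvSection (header : String) (src : List (String × String)) (dflt : String) (fields : List (String × String)) : Option String :=
  let st := fields.foldl
    (fun (acc : Bool × List String) p =>
      match src.lookup p.2 with                              -- 'if key in src: value = src[key]'
      | some value => (acc.1 || (value != ""), acc.2 ++ ["- " ++ p.1 ++ ": " ++ value])
      | none       => (acc.1, acc.2 ++ ["- " ++ p.1 ++ ": " ++ dflt]))
    (false, [header])
  if st.1 then some (PySem.Str.join "\n" st.2) else none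

def build_assistant_response_py_alt (case_summary : List (String × String)) (court_reasoning : List (String × String)) (metadata : List (String × String)) : String :=
  let candidates : List (Option String) :=
    [pvSection "**Case Summary**" case_summary "Not provided"
       [("Facts", "facts"), ("Legal Issue", "legal_issue"),
        ("Law Applied", "law_applied"), ("Judgment", "judgment")],
     pvSection "**Court Reasoning**" court_reasoning "Not provided"
       [("Reasoning", "reasoning"), ("Decision", "decision")],
     pvSection "**Metadata**" metadata "Not specified"
       [("Category", "category"), ("Case Type", "case_type"), ("Law", "law")]]
  PySem.Str.join "\n\n" (candidates.filterMap id)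

-- ===== PRECONDITION & SPEC =====
def Spec_build_assistant_response_py (case_summary : List (String × String)) (court_reasoning : List (String × String)) (metadata : List (String × String)) (out : String) : Prop := out = build_assistant_response_py_alt case_summary court_reasoning metadata
instance (case_summary : List (String × String)) (court_reasoning : List (String × String)) (metadata : List (String × String)) (out : String) : Decidable (Spec_build_assistant_response_py case_summary court_reasoning metadata out) := by unfold Spec_build_assistant_response_py; infer_instance

-- ===== CLAIM (what is proved, stated in full; the proofs are below) =====
def Claim_equal_build_assistant_response_py : Prop := ∀ (case_summary : List (String × String)) (court_reasoning : List (String × String)) (metadata : List (String × String)), Dom_build_assistant_response_py case_summary court_reasoning metadata → Spec_build_assistant_response_py case_summary court_reasoning metadata (build_assistant_response_py case_summary court_reasoning metadata)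

-- ===== LEMMAS AND PROOFS =====

-- the fold of pvSection, with a generalized accumulator
theorem pvSection_foldl (src : List (String × String)) (dflt : String)
    (fields : List (String × String)) (b : Bool) (ls : List String) :
    fields.foldl
      (fun (acc : Bool × List String) p =>
        match src.lookup p.2 with
        | some value => (acc.1 || (value != ""), acc.2 ++ ["- " ++ p.1 ++ ": " ++ value])
        | none       => (acc.1, acc.2 ++ ["- " ++ p.1 ++ ": " ++ dflt]))
      (b, ls)
    = (b || fields.any (fun p => pvTruthy src p.2),
       ls ++ fields.map (fun p => "- " ++ p.1 ++ ": " ++ pvGet src p.2 dflt)) := by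
  induction fields generalizing b ls with
  | nil => simp
  | cons p rest ih =>
      cases h : src.lookup p.2 <;>
        simp [List.foldl_cons, h, ih, pvTruthy, pvGet, Bool.or_assoc]

-- pvSection in guard/render form
theorem pvSection_eq (header : String) (src : List (String × String)) (dflt : String)
    (fields : List (String × String)) :
    pvSection header src dflt fields
    = if fields.any (fun p => pvTruthy src p.2) then
        some (PySem.Str.join "\n"
          (header :: fields.map (fun p => "- " ++ p.1 ++ ": " ++ pvGet src p.2 dflt)))
      else none := by
  unfold pvSection
  rw [pvSection_foldl, Bool.false_or]
  simp

-- ===== VERDICT (by name: the statement is the Claim_ definition above) =====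
theorem build_assistant_response_py_spec : Claim_equal_build_assistant_response_py := by
  intro cs cr md _
  unfold Spec_build_assistant_response_py build_assistant_response_py build_assistant_response_py_alt
  rw [pvSection_eq, pvSection_eq, pvSection_eq]
  by_cases h1 : (["facts", "legal_issue", "law_applied", "judgment"].any fun k => pvTruthy cs k) <;>
  by_cases h2 : (["reasoning", "decision"].any fun k => pvTruthy cr k) <;>
  by_cases h3 : (["category", "case_type", "law"].any fun k => pvTruthy md k) <;>
  simp_all [List.any, PySem.Str.join, PySem.Chars.join, List.intercalate, List.intersperse,
            String.append_assoc]
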